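-- pv_equiv track=rewrite | github.com/ikaushikpal/DS-450-python | Sliding Window/Minimum of all subarrays of size k.py | minimumSubArray
-- ===== SOURCE A (Python) =====
-- from collections import deque
--
-- def minimumSubArray(arr, n, k):
--     i = j = 0
--     queue = deque()
--     res = []
--
--     while j < n:
--         while len(queue) and arr[queue[-1]] > arr[j]:
--             queue.pop()
--         queue.append(j)
--
--         if  j-i+1 < k:
--             j += 1
--         else:
--             res.append(arr[queue[0]])
--             if queue[0] == i:
--                 queue.popleft()
--
--             i += 1
--             j += 1
--
--     return res
-- ===== SOURCE B (Python) =====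
-- def minimumSubArray(arr, n, k):
--     return [min(arr[i:i+k]) for i in range(n - k + 1)]
-- ===== Notes on version B (the rewrite author's own statement) =====
-- stated objective: simpler
-- what changed: Replaced the monotonic-deque single sliding pass with a one-line per-window rescan: each window minimum is computed directly as min(arr[i:i+k]).
-- outside the precondition, e.g. on minimumSubArray([5], 1, 0): A returns [5], B raises ValueError; on minimumSubArray([7, 2], 2, -1): A returns [7, 2], B raises ValueError
import Mathlib
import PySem

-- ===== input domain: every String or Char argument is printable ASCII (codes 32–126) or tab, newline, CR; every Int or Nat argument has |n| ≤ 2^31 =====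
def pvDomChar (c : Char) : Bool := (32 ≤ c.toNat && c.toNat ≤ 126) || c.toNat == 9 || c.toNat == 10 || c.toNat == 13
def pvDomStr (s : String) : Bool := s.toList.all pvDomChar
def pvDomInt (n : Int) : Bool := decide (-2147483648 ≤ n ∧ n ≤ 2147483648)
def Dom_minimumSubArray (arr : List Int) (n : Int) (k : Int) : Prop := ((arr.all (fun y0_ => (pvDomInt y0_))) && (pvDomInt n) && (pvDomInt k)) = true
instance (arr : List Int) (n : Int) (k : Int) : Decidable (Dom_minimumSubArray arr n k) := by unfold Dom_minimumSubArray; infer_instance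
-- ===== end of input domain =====

-- B replaces A's monotonic-deque sliding pass with a direct per-window min rescan (simpler, not faster).

-- ===== PORT A =====
-- inner 'while len(queue) and arr[queue[-1]] > arr[j]: queue.pop()' (queue holds indices, back = end of list)
def pvAPop (arr : List Int) (x : Int) (q : List Int) : List Int :=
  if q ≠ [] ∧ PySem.List.pyGetD arr (PySem.List.pyGetD q (-1) 0) 0 > x then
    pvAPop arr x q.dropLast
  else q
termination_by q.length
decreasing_by
  rename_i h
  have : q ≠ [] := h.1
  simpa [List.length_dropLast] using Nat.sub_lt (List.length_pos_iff.mpr this) one_pos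

-- outer 'while j < n' loop; fuel = number of remaining iterations (j advances by 1 each turn)
def pvALoop (arr : List Int) (n k : Int) (fuel : Nat) (i j : Int) (q res : List Int) : List Int :=
  match fuel with
  | 0 => res
  | fuel + 1 =>
    if j < n then
      let q1 := pvAPop arr (PySem.List.pyGetD arr j 0) q ++ [j]   -- pops then queue.append(j)
      if j - i + 1 < k then
        pvALoop arr n k fuel i (j + 1) q1 res
      else
        let res1 := res ++ [PySem.List.pyGetD arr (PySem.List.pyGetD q1 0 0) 0]  -- res.append(arr[queue[0]])
        let q2 := if PySem.List.pyGetD q1 0 0 = i then q1.tail else q1           -- popleft when queue[0]==i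
        pvALoop arr n k fuel (i + 1) (j + 1) q2 res1
    else res

def minimumSubArray (arr : List Int) (n : Int) (k : Int) : List Int :=
  pvALoop arr n k n.toNat 0 0 [] []

-- ===== PORT B =====
-- [min(arr[i:i+k]) for i in range(n-k+1)]; '.getD 0' stands where Python's min([]) would raise (excluded by Pre_)
def minimumSubArray_alt (arr : List Int) (n : Int) (k : Int) : List Int :=
  (PySem.List.pyRange 0 (n - k + 1) 1).map
    (fun i => (PySem.List.min? (PySem.List.slice arr (some i) (some (i + k))) (fun x => x)).getD 0)

-- ===== PRECONDITION & SPEC =====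
-- Pre_ excludes k ≤ 0 with 0 < n (A accidentally behaves as if k = 1 there, while B's min over an
-- empty slice raises ValueError) and n > len(arr) with 0 < n (A itself raises IndexError there);
-- the trivially-empty region n ≤ 0 ∧ n < k, where both return [], stays admitted.
def Pre_minimumSubArray (arr : List Int) (n : Int) (k : Int) : Prop :=
  (n ≤ (arr.length : Int) ∧ 1 ≤ k) ∨ (n ≤ 0 ∧ n < k)
instance (arr : List Int) (n : Int) (k : Int) : Decidable (Pre_minimumSubArray arr n k) := by
  unfold Pre_minimumSubArray; infer_instance

def pvWitness_minimumSubArray : List Int × Int × Int := ([2, 1, 3, 4, 0], 5, 3)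

def Spec_minimumSubArray (arr : List Int) (n : Int) (k : Int) (out : List Int) : Prop := out = minimumSubArray_alt arr n k
instance (arr : List Int) (n : Int) (k : Int) (out : List Int) : Decidable (Spec_minimumSubArray arr n k out) := by unfold Spec_minimumSubArray; infer_instance

-- ===== CLAIM (what is proved, stated in full; the proofs are below) =====
def Claim_equal_minimumSubArray : Prop := ∀ (arr : List Int) (n : Int) (k : Int), Dom_minimumSubArray arr n k → Pre_minimumSubArray arr n k → Spec_minimumSubArray arr n k (minimumSubArray arr n k)

-- ===== LEMMAS AND PROOFS =====

-- value at index m (as both ports read it)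
def pvV (arr : List Int) (m : Int) : Int := PySem.List.pyGetD arr m 0

-- the canonical monotonic queue for window [i, j]: indices m whose value is ≤ every later value up to j
def pvCQ (arr : List Int) (i j : Int) : List Int :=
  (PySem.List.pyRange i (j + 1) 1).filter
    (fun m => (PySem.List.pyRange (m + 1) (j + 1) 1).all (fun m' => decide (pvV arr m ≤ pvV arr m')))

theorem pvCQ_mem (arr : List Int) (i j m : Int) :
    m ∈ pvCQ arr i j ↔ (i ≤ m ∧ m ≤ j) ∧ ∀ m', m < m' → m' ≤ j → pvV arr m ≤ pvV arr m' := by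
  simp only [pvCQ, List.mem_filter, PySem.List.mem_pyRange_one, List.all_eq_true,
    decide_eq_true_eq]
  constructor
  · rintro ⟨⟨h1, h2⟩, h3⟩
    exact ⟨⟨h1, by omega⟩, fun m' hm hj => h3 m' ⟨by omega, by omega⟩⟩
  · rintro ⟨⟨h1, h2⟩, h3⟩
    exact ⟨⟨h1, by omega⟩, fun m' hm => h3 m' (by omega) (by omega)⟩

theorem pvCQ_nil (arr : List Int) (i j : Int) (h : j < i) : pvCQ arr i j = [] := by
  simp [pvCQ, PySem.List.pyRange_one_eq_nil (show (j + 1 : Int) ≤ i by omega)]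

theorem pvCQ_pairwise_lt (arr : List Int) (i j : Int) : (pvCQ arr i j).Pairwise (· < ·) :=
  (PySem.List.pairwise_lt_pyRange_one i (j+1)).filter _

theorem pvCQ_pairwise_le (arr : List Int) (i j : Int) :
    (pvCQ arr i j).Pairwise (fun a b => pvV arr a ≤ pvV arr b) := by
  have h := pvCQ_pairwise_lt arr i j
  rw [List.pairwise_iff_forall_sublist] at h ⊢
  intro a b hs
  have hab := h hs
  have ha : a ∈ pvCQ arr i j := hs.subset (by simp)
  have hb : b ∈ pvCQ arr i j := hs.subset (by simp)
  rw [pvCQ_mem] at ha hb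
  exact ha.2 b hab hb.1.2

-- pvAPop on a value-nondecreasing list keeps exactly the prefix of values ≤ x
theorem pvAPop_eq_filter (arr : List Int) (x : Int) (q : List Int)
    (h : q.Pairwise (fun a b => pvV arr a ≤ pvV arr b)) :
    pvAPop arr x q = q.filter (fun m => decide (pvV arr m ≤ x)) := by
  induction q using List.reverseRecOn with
  | nil => rw [pvAPop]; simp
  | append_singleton q' m ih =>
    have hpw := List.pairwise_append.mp h
    have hq' := hpw.1
    have hlast : ∀ a ∈ q', pvV arr a ≤ pvV arr m := fun a ha => hpw.2.2 a ha m (by simp)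
    rw [pvAPop]
    by_cases hm : pvV arr m ≤ x
    · rw [if_neg]
      · rw [List.filter_append, List.filter_eq_self.mpr]
        · simp [hm]
        · intro a ha
          exact decide_eq_true (le_trans (hlast a ha) hm)
      · rintro ⟨-, hgt⟩
        rw [PySem.List.pyGetD_neg_one_append_singleton] at hgt
        exact absurd hgt (by simp [pvV] at hm ⊢; omega)
    · rw [if_pos, List.dropLast_concat, ih hq', List.filter_append]
      · simp [hm]
      refine ⟨by simp, ?_⟩
      rw [PySem.List.pyGetD_neg_one_append_singleton]
      simp [pvV] at hm ⊢; omega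

-- one deque step: pops followed by append of j turn the queue for [i, j-1] into the queue for [i, j]
theorem pvCQ_step (arr : List Int) (i j : Int) (hij : i ≤ j) :
    (pvCQ arr i (j - 1)).filter (fun m => decide (pvV arr m ≤ pvV arr j)) ++ [j] = pvCQ arr i j := by
  unfold pvCQ
  have hj1 : j - 1 + 1 = j := by omega
  simp only [hj1]
  rw [PySem.List.pyRange_one_succ_right (show i ≤ j by omega), List.filter_append,
      List.filter_filter]
  have hsing : List.filter
      (fun m => (PySem.List.pyRange (m + 1) (j + 1)).all fun m' => decide (pvV arr m ≤ pvV arr m'))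
      [j] = [j] := by
    simp [PySem.List.pyRange_one_eq_nil (le_refl (j + 1))]
  rw [hsing]
  congr 1
  apply List.filter_congr
  intro m hm
  rw [PySem.List.mem_pyRange_one] at hm
  rw [PySem.List.pyRange_one_succ_right (show m + 1 ≤ j by omega)]
  simp only [List.all_append, List.all_cons, List.all_nil, Bool.and_true]
  rw [Bool.and_comm]

-- splitting off the left end of the window
theorem pvCQ_cons (arr : List Int) (i j : Int) (hij : i ≤ j) :
    pvCQ arr i j =
      (if (PySem.List.pyRange (i + 1) (j + 1) 1).all (fun m' => decide (pvV arr i ≤ pvV arr m')) then [i] else [])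
        ++ pvCQ arr (i + 1) j := by
  unfold pvCQ
  rw [PySem.List.pyRange_one_cons (show i < j + 1 by omega), List.filter_cons]
  split_ifs with h1 <;> simp

theorem pvCQ_ne_nil (arr : List Int) (i j : Int) (hij : i ≤ j) : pvCQ arr i j ≠ [] := by
  have : j ∈ pvCQ arr i j := (pvCQ_mem arr i j j).mpr ⟨⟨hij, le_rfl⟩, fun m' h1 h2 => by omega⟩
  exact List.ne_nil_of_mem this

theorem pvHead_mem (l : List Int) (h : l ≠ []) : PySem.List.pyGetD l 0 0 ∈ l := by
  cases l with
  | nil => exact absurd rfl h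
  | cons a t => simp [PySem.List.pyGetD_zero_cons]

-- the head of the canonical queue attains the window minimum
theorem pvCQ_head_min (arr : List Int) (i j : Int) (hij : i ≤ j) :
    (i ≤ PySem.List.pyGetD (pvCQ arr i j) 0 0 ∧ PySem.List.pyGetD (pvCQ arr i j) 0 0 ≤ j) ∧
    ∀ m, i ≤ m → m ≤ j → pvV arr (PySem.List.pyGetD (pvCQ arr i j) 0 0) ≤ pvV arr m := by
  have key : ∀ (N : ℕ) (i : Int), i ≤ j → (j - i).toNat = N →
      (i ≤ PySem.List.pyGetD (pvCQ arr i j) 0 0 ∧ PySem.List.pyGetD (pvCQ arr i j) 0 0 ≤ j) ∧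
      ∀ m, i ≤ m → m ≤ j → pvV arr (PySem.List.pyGetD (pvCQ arr i j) 0 0) ≤ pvV arr m := by
    intro N
    induction N with
    | zero =>
      intro i hij hN
      have hij' : i = j := by omega
      subst hij'
      rw [pvCQ_cons arr i i le_rfl, if_pos (by simp [PySem.List.pyRange_one_eq_nil (le_refl (i+1))]),
          pvCQ_nil arr (i+1) i (by omega)]
      refine ⟨⟨by simp [PySem.List.pyGetD_zero_cons], by simp [PySem.List.pyGetD_zero_cons]⟩, ?_⟩
      intro m h1 h2
      have : m = i := by omega
      simp [this, PySem.List.pyGetD_zero_cons]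
    | succ N ih =>
      intro i hij hN
      rw [pvCQ_cons arr i j hij]
      by_cases hP : (PySem.List.pyRange (i + 1) (j + 1) 1).all
          (fun m' => decide (pvV arr i ≤ pvV arr m')) = true
      · rw [if_pos hP]
        simp only [List.cons_append, List.nil_append] at *
        rw [List.all_eq_true] at hP
        refine ⟨⟨by simp [PySem.List.pyGetD_zero_cons], by simp [PySem.List.pyGetD_zero_cons]; omega⟩, ?_⟩
        intro m h1 h2
        rcases eq_or_lt_of_le h1 with h | h
        · simp [← h, PySem.List.pyGetD_zero_cons]
        · have := hP m (by rw [PySem.List.mem_pyRange_one]; omega)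
          simp only [decide_eq_true_eq] at this
          simpa [PySem.List.pyGetD_zero_cons] using this
      · rw [if_neg hP, List.nil_append]
        have hex : ∃ m', (i + 1 ≤ m' ∧ m' ≤ j) ∧ pvV arr m' < pvV arr i := by
          rw [List.all_eq_true] at hP
          push Not at hP
          obtain ⟨m', hm', hv⟩ := hP
          rw [PySem.List.mem_pyRange_one] at hm'
          exact ⟨m', ⟨by omega, by omega⟩, by simpa using hv⟩
        obtain ⟨m', ⟨hm1, hm2⟩, hv⟩ := hex
        have hij2 : i + 1 ≤ j := by omega
        have := ih (i + 1) hij2 (by omega)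
        refine ⟨⟨by omega, this.1.2⟩, ?_⟩
        intro m h1 h2
        rcases eq_or_lt_of_le h1 with h | h
        · calc pvV arr (PySem.List.pyGetD (pvCQ arr (i+1) j) 0 0) ≤ pvV arr m' := this.2 m' hm1 hm2
            _ ≤ pvV arr m := by rw [← h]; omega
        · exact this.2 m (by omega) h2
  exact key (j - i).toNat i hij rfl

-- popleft step: dropping i from the queue gives the queue of the shrunk window
theorem pvCQ_popleft (arr : List Int) (i j : Int) (hij : i ≤ j) :
    (if PySem.List.pyGetD (pvCQ arr i j) 0 0 = i then (pvCQ arr i j).tail else pvCQ arr i j)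
      = pvCQ arr (i + 1) j := by
  rw [pvCQ_cons arr i j hij]
  by_cases hP : (PySem.List.pyRange (i + 1) (j + 1) 1).all
      (fun m' => decide (pvV arr i ≤ pvV arr m')) = true
  · rw [if_pos hP]
    simp [PySem.List.pyGetD_zero_cons]
  · rw [if_neg hP, List.nil_append]
    have hij2 : i + 1 ≤ j := by
      by_contra hc
      apply hP
      rw [List.all_eq_true]
      intro m' hm'
      rw [PySem.List.mem_pyRange_one] at hm'
      omega
    have hne := pvCQ_ne_nil arr (i + 1) j hij2
    have hmem := pvHead_mem _ hne
    rw [pvCQ_mem] at hmem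
    rw [if_neg (by omega)]

-- B's per-window computation gives the value at the queue head
theorem pvWindow_min (arr : List Int) (n k i j : Int)
    (hlen : n ≤ (arr.length : Int)) (hi : 0 ≤ i) (hj : i + k = j + 1) (hk : 1 ≤ k) (hjn : j < n) :
    (PySem.List.min? (PySem.List.slice arr (some i) (some (i + k))) (fun x => x)).getD 0
      = pvV arr (PySem.List.pyGetD (pvCQ arr i j) 0 0) := by
  have h0j : 0 ≤ j := by omega
  have hjlen : j < (arr.length : Int) := by omega
  rw [PySem.List.slice_toNat _ hi (by omega)]
  have hmemS : ∀ x, x ∈ (arr.drop i.toNat).take ((i + k).toNat - i.toNat) ↔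
      ∃ m : Int, i ≤ m ∧ m ≤ j ∧ x = pvV arr m := by
    intro x
    rw [List.mem_iff_getElem]
    constructor
    · rintro ⟨t, ht, hx⟩
      have htlen : t < k.toNat := by
        simp only [List.length_take, List.length_drop] at ht; omega
      refine ⟨i + t, by omega, by omega, ?_⟩
      rw [pvV, PySem.List.pyGetD_eq_getElem _ _ (by omega) (by omega)]
      rw [← hx]
      simp only [List.getElem_take, List.getElem_drop]
      congr 1
      omega
    · rintro ⟨m, h1, h2, hx⟩
      refine ⟨(m - i).toNat, ?_, ?_⟩
      · simp only [List.length_take, List.length_drop]; omega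
      · rw [hx, pvV, PySem.List.pyGetD_eq_getElem _ _ (by omega) (by omega)]
        simp only [List.getElem_take, List.getElem_drop]
        congr 1
        omega
  obtain ⟨⟨hh1, hh2⟩, hmin⟩ := pvCQ_head_min arr i j (by omega)
  have hhd : pvV arr (PySem.List.pyGetD (pvCQ arr i j) 0 0)
      ∈ (arr.drop i.toNat).take ((i + k).toNat - i.toNat) :=
    (hmemS _).mpr ⟨_, hh1, hh2, rfl⟩
  cases hmv : PySem.List.min? ((arr.drop i.toNat).take ((i + k).toNat - i.toNat)) (fun x => x) with
  | none =>
    rw [PySem.List.min?_eq_none_iff] at hmv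
    rw [hmv] at hhd
    simp at hhd
  | some mv =>
    obtain ⟨m, hm1, hm2, hm3⟩ := (hmemS mv).mp (PySem.List.min?_mem hmv)
    have h2 : pvV arr (PySem.List.pyGetD (pvCQ arr i j) 0 0) ≤ mv := hm3 ▸ hmin m hm1 hm2
    have h3 : mv ≤ pvV arr (PySem.List.pyGetD (pvCQ arr i j) 0 0) := PySem.List.min?_isMin hmv _ hhd
    simp only [Option.getD_some]
    omega

-- main loop invariant
theorem pvALoop_main (arr : List Int) (n k : Int) (hlen : n ≤ (arr.length : Int)) (hk : 1 ≤ k) :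
    ∀ (fuel : Nat) (j i res : _), 0 ≤ j → j ≤ n → i = max 0 (j - k + 1) → fuel = (n - j).toNat →
    pvALoop arr n k fuel i j (pvCQ arr i (j - 1)) res
      = res ++ (PySem.List.pyRange i (n - k + 1) 1).map
          (fun s => (PySem.List.min? (PySem.List.slice arr (some s) (some (s + k))) (fun x => x)).getD 0) := by
  intro fuel
  induction fuel with
  | zero =>
    intro j i res h0 hjn hi hfuel
    have hj : j = n := by omega
    rw [pvALoop, PySem.List.pyRange_one_eq_nil (show n - k + 1 ≤ i by omega)]
    simp
  | succ fuel ih =>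
    intro j i res h0 hjn hi hfuel
    have hjlt : j < n := by omega
    have hij : i ≤ j := by omega
    rw [pvALoop, if_pos hjlt]
    have hq1 : pvAPop arr (PySem.List.pyGetD arr j 0) (pvCQ arr i (j - 1)) ++ [j] = pvCQ arr i j := by
      rw [show PySem.List.pyGetD arr j 0 = pvV arr j from rfl,
          pvAPop_eq_filter arr _ _ (pvCQ_pairwise_le arr i (j - 1)), pvCQ_step arr i j hij]
    simp only [hq1]
    by_cases hcond : j - i + 1 < k
    · rw [if_pos hcond]
      have := ih (j + 1) i res (by omega) (by omega) (by omega) (by omega)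
      rwa [show j + 1 - 1 = j by omega] at this
    · rw [if_neg hcond]
      have hieq : i = j - k + 1 := by omega
      have hw := pvWindow_min arr n k i j hlen (by omega) (by omega) hk hjlt
      have hq2 := pvCQ_popleft arr i j hij
      simp only [hq2]
      have := ih (j + 1) (i + 1) (res ++ [PySem.List.pyGetD arr (PySem.List.pyGetD (pvCQ arr i j) 0 0) 0])
        (by omega) (by omega) (by omega) (by omega)
      rw [show j + 1 - 1 = j by omega] at this
      rw [this, PySem.List.pyRange_one_cons (show i < n - k + 1 by omega), List.map_cons]
      have hv : PySem.List.pyGetD arr (PySem.List.pyGetD (pvCQ arr i j) 0 0) 0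
          = (PySem.List.min? (PySem.List.slice arr (some i) (some (i + k))) (fun x => x)).getD 0 := by
        rw [hw]; rfl
      rw [hv]
      simp

-- ===== VERDICT (by name: the statement is the Claim_ definition above) =====
theorem minimumSubArray_spec : Claim_equal_minimumSubArray := by
  intro arr n k _ hpre
  unfold Spec_minimumSubArray minimumSubArray minimumSubArray_alt
  by_cases hn : 0 < n
  · obtain ⟨hlen, hk⟩ | ⟨hn', -⟩ := hpre
    · have h0 : pvCQ arr 0 (0 - 1) = [] := pvCQ_nil arr 0 (0 - 1) (by omega)
      have := pvALoop_main arr n k hlen hk n.toNat 0 0 [] le_rfl (by omega) (by omega) (by omega)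
      rw [h0] at this
      simpa using this
    · omega
  · have h1 : n.toNat = 0 := by omega
    have h2 : PySem.List.pyRange 0 (n - k + 1) 1 = [] :=
      PySem.List.pyRange_one_eq_nil (by rcases hpre with ⟨-, hk⟩ | ⟨-, hk⟩ <;> omega)
    simp [h1, h2, pvALoop]
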